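-- pv_equiv track=rewrite | github.com/phatryun/Advent_code | 2020/day 17/Exercice17_2.py | neighboursFromDist
-- ===== SOURCE A (Python) =====
-- def neighboursFromDist(x, y, z, w, dist_max) :
--     x_min, x_max = x - dist_max, x + dist_max
--     y_min, y_max = y - dist_max, y + dist_max
--     z_min, z_max = z - dist_max, z + dist_max
--     w_min, w_max = w - dist_max, w + dist_max
--
--
--     list_res = []
--     for w_val in range(w_min, w_max + 1):
--         for z_val in range(z_min, z_max + 1):
--             for y_val in range(y_min, y_max + 1) :
--                 for x_val in range(x_min, x_max + 1) :
--                     if not ((x_val == x) & (y_val == y) & (z_val == z) & (w_val == w)):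
--                         list_res.append((x_val, y_val, z_val, w_val))
--     return list_res
-- ===== SOURCE B (Python) =====
-- def neighboursFromDist(x, y, z, w, dist_max):
--     # Single loop over a linear index 0..k^4-1, decoding each index into the
--     # four coordinates by mixed-radix (base-k) arithmetic; the center is the
--     # one index whose four digits all equal dist_max, computed in closed form
--     # and skipped.  x is the fastest-varying digit, matching A's loop order.
--     if dist_max < 0:
--         return []
--     k = 2 * dist_max + 1
--     center = dist_max * (k ** 3 + k ** 2 + k + 1)
--     res = []
--     for i in range(k ** 4):
--         if i == center:
--             continue
--         res.append((x - dist_max + i % k,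
--                     y - dist_max + (i // k) % k,
--                     z - dist_max + (i // k ** 2) % k,
--                     w - dist_max + i // k ** 3))
--     return res
-- ===== Notes on version B (the rewrite author's own statement) =====
-- stated objective: alternative
-- what changed: B replaces A's four nested coordinate loops with a single loop over one linear index 0..k^4-1, decoding each index into the four coordinates by mixed-radix (base-k) div/mod arithmetic and skipping the closed-form index of the center, instead of enumerating a 4D product and testing a four-way equality per cell.
import Mathlib
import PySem

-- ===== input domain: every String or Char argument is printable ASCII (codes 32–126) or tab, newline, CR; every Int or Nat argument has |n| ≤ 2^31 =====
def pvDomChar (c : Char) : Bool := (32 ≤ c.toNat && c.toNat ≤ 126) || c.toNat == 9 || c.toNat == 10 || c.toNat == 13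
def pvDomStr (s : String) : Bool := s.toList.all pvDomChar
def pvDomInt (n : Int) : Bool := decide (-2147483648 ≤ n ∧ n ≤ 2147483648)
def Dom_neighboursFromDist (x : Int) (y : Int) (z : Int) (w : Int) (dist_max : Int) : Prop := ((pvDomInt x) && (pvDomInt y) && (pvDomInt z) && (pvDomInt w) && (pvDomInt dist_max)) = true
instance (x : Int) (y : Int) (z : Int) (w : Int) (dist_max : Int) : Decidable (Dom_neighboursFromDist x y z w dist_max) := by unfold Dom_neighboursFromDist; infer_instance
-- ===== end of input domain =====

-- B replaces the four nested loops by a single loop over a linear index,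
-- decoding each index into the four coordinates by mixed-radix (base-k)
-- arithmetic and skipping the one index of the center (objective: alternative).

-- ===== PORT A =====
def neighboursFromDist (x : Int) (y : Int) (z : Int) (w : Int) (dist_max : Int) : List (Int × Int × Int × Int) :=
  let x_min := x - dist_max; let x_max := x + dist_max
  let y_min := y - dist_max; let y_max := y + dist_max
  let z_min := z - dist_max; let z_max := z + dist_max
  let w_min := w - dist_max; let w_max := w + dist_max
  (PySem.List.pyRange w_min (w_max + 1) 1).foldl (fun acc w_val =>
    (PySem.List.pyRange z_min (z_max + 1) 1).foldl (fun acc z_val =>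
      (PySem.List.pyRange y_min (y_max + 1) 1).foldl (fun acc y_val =>
        (PySem.List.pyRange x_min (x_max + 1) 1).foldl (fun acc x_val =>
          if !((((x_val == x) && (y_val == y)) && (z_val == z)) && (w_val == w)) then
            acc ++ [(x_val, y_val, z_val, w_val)]
          else acc) acc) acc) acc) []

-- ===== PORT B =====
def neighboursFromDist_alt (x : Int) (y : Int) (z : Int) (w : Int) (dist_max : Int) : List (Int × Int × Int × Int) :=
  if dist_max < 0 then []
  else
    let k := 2 * dist_max + 1
    let center := dist_max * (k ^ 3 + k ^ 2 + k + 1)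
    (PySem.List.pyRange 0 (k ^ 4) 1).foldl (fun res i =>
      if i == center then res
      else res ++ [(x - dist_max + PySem.Int.mod i k,
                    y - dist_max + PySem.Int.mod (PySem.Int.floordiv i k) k,
                    z - dist_max + PySem.Int.mod (PySem.Int.floordiv i (k ^ 2)) k,
                    w - dist_max + PySem.Int.floordiv i (k ^ 3))]) []

-- ===== PRECONDITION & SPEC =====
def Spec_neighboursFromDist (x : Int) (y : Int) (z : Int) (w : Int) (dist_max : Int) (out : List (Int × Int × Int × Int)) : Prop := out = neighboursFromDist_alt x y z w dist_max
instance (x : Int) (y : Int) (z : Int) (w : Int) (dist_max : Int) (out : List (Int × Int × Int × Int)) : Decidable (Spec_neighboursFromDist x y z w dist_max out) := by unfold Spec_neighboursFromDist; infer_instance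

-- ===== CLAIM (what is proved, stated in full; the proofs are below) =====
def Claim_equal_neighboursFromDist : Prop := ∀ (x : Int) (y : Int) (z : Int) (w : Int) (dist_max : Int), Dom_neighboursFromDist x y z w dist_max → Spec_neighboursFromDist x y z w dist_max (neighboursFromDist x y z w dist_max)

-- ===== LEMMAS AND PROOFS =====

-- The full product list A traverses
def pvFull (x y z w d : Int) : List (Int × Int × Int × Int) :=
  (PySem.List.pyRange (w - d) (w + d + 1) 1).flatMap (fun w_val =>
    (PySem.List.pyRange (z - d) (z + d + 1) 1).flatMap (fun z_val =>
      (PySem.List.pyRange (y - d) (y + d + 1) 1).flatMap (fun y_val =>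
        (PySem.List.pyRange (x - d) (x + d + 1) 1).map (fun x_val =>
          (x_val, y_val, z_val, w_val)))))

-- B's per-index decoding
def pvDec (x y z w d k i : Int) : Int × Int × Int × Int :=
  (x - d + PySem.Int.mod i k,
   y - d + PySem.Int.mod (PySem.Int.floordiv i k) k,
   z - d + PySem.Int.mod (PySem.Int.floordiv i (k ^ 2)) k,
   w - d + PySem.Int.floordiv i (k ^ 3))

def pvDecN (kN j : Nat) : Nat × Nat × Nat × Nat :=
  (j % kN, j / kN % kN, j / kN ^ 2 % kN, j / kN ^ 3)

theorem filter_flatMap' {α β : Type} (l : List α) (g : α → List β) (p : β → Bool) :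
    (l.flatMap g).filter p = l.flatMap (fun a => (g a).filter p) := by
  induction l with
  | nil => rfl
  | cons a l ih => simp [List.flatMap_cons, List.filter_append, ih]

theorem pvA_eq_filter (x y z w d : Int) :
    neighboursFromDist x y z w d = (pvFull x y z w d).filter (fun t => !(t == (x, y, z, w))) := by
  unfold neighboursFromDist pvFull
  simp only [PySem.List.foldl_append_if, PySem.List.foldl_append_eq_flatMap, List.nil_append,
    filter_flatMap', List.filter_map]
  refine List.flatMap_congr ?_
  intro wv _
  refine List.flatMap_congr ?_
  intro zv _
  refine List.flatMap_congr ?_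
  intro yv _
  refine congrArg (List.map _) (List.filter_congr ?_)
  intro xv _
  simp only [Function.comp_apply]
  rw [show ((xv, yv, zv, wv) == (x, y, z, w)) = (xv == x && (yv == y && (zv == z && wv == w))) from rfl]
  simp [Bool.and_assoc]

theorem pvFull_nil (x y z w d : Int) (hd : d < 0) : pvFull x y z w d = [] := by
  unfold pvFull
  rw [show PySem.List.pyRange (w - d) (w + d + 1) 1 = [] from PySem.List.pyRange_one_eq_nil (by omega)]
  rfl

-- B's foldl with a skip branch is a filter-then-map
theorem pvFoldl_skip {α β : Type} (p : α → Bool) (f : α → β) :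
    ∀ (l : List α) (init : List β),
      l.foldl (fun acc i => if p i then acc else acc ++ [f i]) init
        = init ++ (l.filter (fun i => !p i)).map f := by
  intro l
  induction l with
  | nil => simp
  | cons a l ih =>
    intro init
    by_cases h : p a = true
    · simp [List.foldl_cons, h, ih]
    · simp only [Bool.not_eq_true] at h
      simp [List.foldl_cons, h, ih]

-- mixed-radix split of a product range
theorem pvRangeMul {β : Type} (m n : Nat) (f : Nat → β) :
    (List.range (m * n)).map f
      = (List.range m).flatMap (fun a => (List.range n).map (fun b => f (a * n + b))) := by
  induction m with
  | zero => simp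
  | succ m ih =>
    rw [show (m + 1) * n = m * n + n from by ring, List.range_add, List.map_append,
      List.range_succ, List.flatMap_append, ih]
    simp [List.map_map, Function.comp_def]

-- decoding the linear range gives the nested product (digit order: w,z,y,x)
theorem pvDigits {β : Type} (kN : Nat) (hk : 0 < kN) (G : Nat → Nat → Nat → Nat → β) :
    (List.range (kN ^ 4)).map (fun j => G (j % kN) (j / kN % kN) (j / kN ^ 2 % kN) (j / kN ^ 3))
      = (List.range kN).flatMap (fun wv =>
          (List.range kN).flatMap (fun zv =>
            (List.range kN).flatMap (fun yv =>
              (List.range kN).map (fun xv => G xv yv zv wv)))) := by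
  rw [show kN ^ 4 = kN * kN ^ 3 from by ring, pvRangeMul]
  refine List.flatMap_congr ?_
  intro wv hwv
  have h1 : ∀ b ∈ List.range (kN ^ 3),
      G ((wv * kN ^ 3 + b) % kN) ((wv * kN ^ 3 + b) / kN % kN)
        ((wv * kN ^ 3 + b) / kN ^ 2 % kN) ((wv * kN ^ 3 + b) / kN ^ 3)
      = G (b % kN) (b / kN % kN) (b / kN ^ 2 % kN) wv := by
    intro b hb
    rw [List.mem_range] at hb
    have e0 : (wv * kN ^ 3 + b) % kN = b % kN := by
      rw [show wv * kN ^ 3 + b = kN * (wv * kN ^ 2) + b from by ring, Nat.mul_add_mod]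
    have e1 : (wv * kN ^ 3 + b) / kN = wv * kN ^ 2 + b / kN := by
      rw [show wv * kN ^ 3 + b = kN * (wv * kN ^ 2) + b from by ring, Nat.mul_add_div hk]
    have e1' : (wv * kN ^ 2 + b / kN) % kN = b / kN % kN := by
      rw [show wv * kN ^ 2 + b / kN = kN * (wv * kN) + b / kN from by ring, Nat.mul_add_mod]
    have e2 : (wv * kN ^ 3 + b) / kN ^ 2 = wv * kN + b / kN ^ 2 := by
      rw [show wv * kN ^ 3 + b = kN ^ 2 * (wv * kN) + b from by ring,
        Nat.mul_add_div (by positivity)]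
    have e2' : (wv * kN + b / kN ^ 2) % kN = b / kN ^ 2 % kN := by
      rw [show wv * kN + b / kN ^ 2 = kN * wv + b / kN ^ 2 from by ring, Nat.mul_add_mod]
    have e3 : (wv * kN ^ 3 + b) / kN ^ 3 = wv := by
      rw [show wv * kN ^ 3 + b = kN ^ 3 * wv + b from by ring,
        Nat.mul_add_div (by positivity), Nat.div_eq_of_lt hb, Nat.add_zero]
    rw [e0, e1, e1', e2, e2', e3]
  rw [List.map_congr_left h1]
  rw [show kN ^ 3 = kN * kN ^ 2 from by ring, pvRangeMul]
  refine List.flatMap_congr ?_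
  intro zv hzv
  have h2 : ∀ e ∈ List.range (kN ^ 2),
      G ((zv * kN ^ 2 + e) % kN) ((zv * kN ^ 2 + e) / kN % kN)
        ((zv * kN ^ 2 + e) / kN ^ 2 % kN) wv
      = G (e % kN) (e / kN % kN) zv wv := by
    intro e he
    rw [List.mem_range] at he
    rw [List.mem_range] at hzv
    have e0 : (zv * kN ^ 2 + e) % kN = e % kN := by
      rw [show zv * kN ^ 2 + e = kN * (zv * kN) + e from by ring, Nat.mul_add_mod]
    have e1 : (zv * kN ^ 2 + e) / kN = zv * kN + e / kN := by
      rw [show zv * kN ^ 2 + e = kN * (zv * kN) + e from by ring, Nat.mul_add_div hk]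
    have e1' : (zv * kN + e / kN) % kN = e / kN % kN := by
      rw [show zv * kN + e / kN = kN * zv + e / kN from by ring, Nat.mul_add_mod]
    have e2 : (zv * kN ^ 2 + e) / kN ^ 2 % kN = zv := by
      rw [show zv * kN ^ 2 + e = kN ^ 2 * zv + e from by ring,
        Nat.mul_add_div (by positivity), Nat.div_eq_of_lt he, Nat.add_zero,
        Nat.mod_eq_of_lt hzv]
    rw [e0, e1, e1', e2]
  rw [List.map_congr_left h2]
  rw [show kN ^ 2 = kN * kN from by ring, pvRangeMul]
  refine List.flatMap_congr ?_
  intro yv hyv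
  rw [List.mem_range] at hyv
  refine List.map_congr_left ?_
  intro xv hxv
  rw [List.mem_range] at hxv
  rw [show (yv * kN + xv) % kN = xv % kN from by
      rw [show yv * kN + xv = kN * yv + xv from by ring, Nat.mul_add_mod],
    Nat.mod_eq_of_lt hxv,
    show (yv * kN + xv) / kN = yv + xv / kN from by
      rw [show yv * kN + xv = kN * yv + xv from by ring, Nat.mul_add_div hk],
    Nat.div_eq_of_lt hxv, Nat.add_zero, Nat.mod_eq_of_lt hyv]

-- reconstruction: the four digits determine the index
theorem pvRecon (kN : Nat) (_hk : 0 < kN) (j : Nat) :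
    ((j / kN ^ 3 * kN + j / kN ^ 2 % kN) * kN + j / kN % kN) * kN + j % kN = j := by
  have h0 : kN * (j / kN) + j % kN = j := Nat.div_add_mod j kN
  have h1 : kN * (j / kN / kN) + j / kN % kN = j / kN := Nat.div_add_mod _ kN
  have h2 : kN * (j / kN / kN / kN) + j / kN / kN % kN = j / kN / kN := Nat.div_add_mod _ kN
  have e1 : j / kN / kN = j / kN ^ 2 := by rw [Nat.div_div_eq_div_mul]; ring_nf
  have e2 : j / kN / kN / kN = j / kN ^ 3 := by
    rw [Nat.div_div_eq_div_mul, Nat.div_div_eq_div_mul]; ring_nf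
  rw [e2] at h2
  rw [e1] at h2
  rw [e1] at h1
  calc ((j / kN ^ 3 * kN + j / kN ^ 2 % kN) * kN + j / kN % kN) * kN + j % kN
      = kN * (kN * (kN * (j / kN ^ 3) + j / kN ^ 2 % kN) + j / kN % kN) + j % kN := by ring
    _ = kN * (kN * (j / kN ^ 2) + j / kN % kN) + j % kN := by rw [h2]
    _ = kN * (j / kN) + j % kN := by rw [h1]
    _ = j := h0

theorem pvDecN_inj (kN : Nat) (hk : 0 < kN) {i j : Nat}
    (h : pvDecN kN i = pvDecN kN j) : i = j := by
  simp only [pvDecN, Prod.mk.injEq] at h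
  obtain ⟨h1, h2, h3, h4⟩ := h
  have := pvRecon kN hk i
  rw [h1, h2, h3, h4, pvRecon kN hk j] at this
  exact this.symm

-- the digits of the center index are all dN
theorem pvCenterDigits (kN dN : Nat) (h : dN < kN) :
    pvDecN kN (dN * (kN ^ 3 + kN ^ 2 + kN + 1)) = (dN, dN, dN, dN) := by
  have hk : 0 < kN := by omega
  have hlt2 : dN * kN + dN < kN ^ 2 := by nlinarith
  have hlt3 : dN * kN ^ 2 + dN * kN + dN < kN ^ 3 := by nlinarith
  unfold pvDecN
  have e0 : dN * (kN ^ 3 + kN ^ 2 + kN + 1) % kN = dN := by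
    rw [show dN * (kN ^ 3 + kN ^ 2 + kN + 1) = kN * (dN * kN ^ 2 + dN * kN + dN) + dN from by ring,
      Nat.mul_add_mod, Nat.mod_eq_of_lt h]
  have e1 : dN * (kN ^ 3 + kN ^ 2 + kN + 1) / kN = dN * kN ^ 2 + dN * kN + dN := by
    rw [show dN * (kN ^ 3 + kN ^ 2 + kN + 1) = kN * (dN * kN ^ 2 + dN * kN + dN) + dN from by ring,
      Nat.mul_add_div hk, Nat.div_eq_of_lt h, Nat.add_zero]
  have e1' : (dN * kN ^ 2 + dN * kN + dN) % kN = dN := by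
    rw [show dN * kN ^ 2 + dN * kN + dN = kN * (dN * kN + dN) + dN from by ring,
      Nat.mul_add_mod, Nat.mod_eq_of_lt h]
  have e2 : dN * (kN ^ 3 + kN ^ 2 + kN + 1) / kN ^ 2 % kN = dN := by
    rw [show dN * (kN ^ 3 + kN ^ 2 + kN + 1) = kN ^ 2 * (dN * kN + dN) + (dN * kN + dN) from by ring,
      Nat.mul_add_div (by positivity), Nat.div_eq_of_lt hlt2, Nat.add_zero,
      show (dN * kN + dN) % kN = dN from by
        rw [show dN * kN + dN = kN * dN + dN from by ring, Nat.mul_add_mod, Nat.mod_eq_of_lt h]]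
  have e3 : dN * (kN ^ 3 + kN ^ 2 + kN + 1) / kN ^ 3 = dN := by
    rw [show dN * (kN ^ 3 + kN ^ 2 + kN + 1) = kN ^ 3 * dN + (dN * kN ^ 2 + dN * kN + dN) from by ring,
      Nat.mul_add_div (by positivity), Nat.div_eq_of_lt hlt3, Nat.add_zero]
  rw [e0, e1, e1', e2, e3]

-- Int decoding of a cast index is the cast of the Nat decoding
theorem pvDec_cast (x y z w : Int) (dN kN : Nat) (j : Nat) :
    pvDec x y z w (dN : Int) (kN : Int) (j : Nat)
      = (x - (dN : Int) + ((pvDecN kN j).1 : Int),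
         y - (dN : Int) + ((pvDecN kN j).2.1 : Int),
         z - (dN : Int) + ((pvDecN kN j).2.2.1 : Int),
         w - (dN : Int) + ((pvDecN kN j).2.2.2 : Int)) := by
  unfold pvDec pvDecN
  rw [show ((kN : Int)) ^ 2 = ((kN ^ 2 : Nat) : Int) from by push_cast; ring,
    show ((kN : Int)) ^ 3 = ((kN ^ 3 : Nat) : Int) from by push_cast; ring]
  simp only [PySem.Int.mod_natCast, PySem.Int.floordiv_natCast]

-- pvFull as the decoded linear range
theorem pvFull_eq_map (x y z w : Int) (dN : Nat) :
    pvFull x y z w (dN : Int)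
      = (List.range ((2 * dN + 1) ^ 4)).map
          (fun j => pvDec x y z w (dN : Int) ((2 * dN + 1 : Nat) : Int) (j : Nat)) := by
  have hkpos : 0 < 2 * dN + 1 := by omega
  have hrange : ∀ a : Int, PySem.List.pyRange (a - (dN : Int)) (a + (dN : Int) + 1) 1
      = (List.range (2 * dN + 1)).map (fun t : Nat => a - (dN : Int) + (t : Int)) := by
    intro a
    have ht : (a + (dN : Int) + 1 - (a - (dN : Int))).toNat = 2 * dN + 1 := by omega
    rw [PySem.List.pyRange_one, ht]
  rw [List.map_congr_left (fun j _ => pvDec_cast x y z w dN (2 * dN + 1) j)]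
  simp only [pvDecN]
  rw [pvDigits (2 * dN + 1) hkpos
    (fun xv yv zv wv => (x - (dN : Int) + (xv : Int), y - (dN : Int) + (yv : Int),
      z - (dN : Int) + (zv : Int), w - (dN : Int) + (wv : Int)))]
  unfold pvFull
  rw [hrange w, hrange z, hrange y, hrange x]
  simp [List.flatMap_map, List.map_map, Function.comp_def]

-- ===== VERDICT (by name: the statement is the Claim_ definition above) =====
theorem neighboursFromDist_spec : Claim_equal_neighboursFromDist := by
  intro x y z w d _
  show neighboursFromDist x y z w d = neighboursFromDist_alt x y z w d
  unfold neighboursFromDist_alt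
  by_cases hd : d < 0
  · rw [if_pos hd, pvA_eq_filter, pvFull_nil x y z w d hd]
    rfl
  · rw [if_neg hd]
    rw [Int.not_lt] at hd
    obtain ⟨dN, rfl⟩ : ∃ dN : Nat, d = (dN : Int) := ⟨d.toNat, (Int.toNat_of_nonneg hd).symm⟩
    have hkpos : 0 < 2 * dN + 1 := by omega
    have hkcast : (2 * (dN : Int) + 1) = ((2 * dN + 1 : Nat) : Int) := by push_cast; ring
    set kN : Nat := 2 * dN + 1 with hkN
    set cN : Nat := dN * (kN ^ 3 + kN ^ 2 + kN + 1) with hcN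
    have hccast : (dN : Int) * ((2 * (dN : Int) + 1) ^ 3 + (2 * (dN : Int) + 1) ^ 2
        + (2 * (dN : Int) + 1) + 1) = (cN : Int) := by rw [hkcast, hcN]; push_cast; ring
    have hrange0 : PySem.List.pyRange 0 ((2 * (dN : Int) + 1) ^ 4) 1
        = (List.range (kN ^ 4)).map (fun j : Nat => (j : Int)) := by
      have ht : ((2 * (dN : Int) + 1) ^ 4 - 0).toNat = kN ^ 4 := by
        rw [show (2 * (dN : Int) + 1) ^ 4 - 0 = ((kN ^ 4 : Nat) : Int) from by
          rw [hkN]; push_cast; ring, Int.toNat_natCast]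
      rw [PySem.List.pyRange_one, ht]
      simp
    rw [pvFoldl_skip, hrange0, List.nil_append, hccast, List.filter_map,
      pvA_eq_filter, pvFull_eq_map x y z w dN, ← hkcast, List.filter_map, List.map_map]
    congr 1
    refine List.filter_congr ?_
    intro j _
    simp only [Function.comp_apply]
    congr 1
    rw [Bool.eq_iff_iff, beq_iff_eq, beq_iff_eq]
    constructor
    · intro h
      rw [hkcast] at h
      rw [pvDec_cast x y z w dN kN j] at h
      simp only [pvDecN, Prod.mk.injEq] at h
      obtain ⟨h1, h2, h3, h4⟩ := h
      have hdig : pvDecN kN j = (dN, dN, dN, dN) := by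
        simp only [pvDecN, Prod.mk.injEq]
        omega
      have : j = cN := by
        refine pvDecN_inj kN hkpos ?_
        rw [hdig, pvCenterDigits kN dN (by omega)]
      exact_mod_cast this
    · intro h
      have hj : j = cN := by exact_mod_cast h
      subst hj
      rw [hkcast, pvDec_cast x y z w dN kN cN, hcN,
        pvCenterDigits kN dN (by omega)]
      simp only [Prod.mk.injEq]
      omega
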